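-- pv_equiv track=rewrite | github.com/jamestagal/pocket-agent-os | archive/core/nodes/delegation.py | format_product_context
-- ===== SOURCE A (Python) =====
-- from typing import Any, Dict, List, Optional
--
-- def format_product_context(product_files: Dict[str, str]) -> str:
--     """
--     Format product files into readable context for delegation.
--
--     Prioritizes key files: mission.md, roadmap.md, tech-stack.md
--     """
--     if not product_files:
--         return ""
--
--     sections = []
--
--     # Priority order for product files
--     priority_files = ["mission.md", "roadmap.md", "tech-stack.md"]
--
--     # Add priority files first
--     for filename in priority_files:
--         if filename in product_files:
--             content = product_files[filename]
--             sections.append(f"### {filename}\n\n{content}")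
--
--     # Add other product files
--     other_files = [f for f in product_files.keys() if f not in priority_files]
--     for filename in sorted(other_files):
--         content = product_files[filename]
--         if filename.endswith(('.yaml', '.yml')):
--             sections.append(f"### {filename}\n\n```yaml\n{content}\n```")
--         else:
--             sections.append(f"### {filename}\n\n{content}")
--
--     return "\n\n---\n\n".join(sections)
-- ===== SOURCE B (Python) =====
-- def format_product_context(product_files):
--     """One composite-key sort, then a single uniform formatting pass."""
--     if not product_files:
--         return ""
--
--     priority_files = ["mission.md", "roadmap.md", "tech-stack.md"]
--
--     def sort_key(f):
--         # priority files get rank '0'/'1'/'2' in their fixed order, everything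
--         # else rank '3'; ties broken by the filename itself (string lex order).
--         rank = priority_files.index(f) if f in priority_files else len(priority_files)
--         return str(rank) + f
--
--     sections = []
--     for filename in sorted(product_files, key=sort_key):
--         content = product_files[filename]
--         if filename.endswith(('.yaml', '.yml')):
--             sections.append(f"### {filename}\n\n```yaml\n{content}\n```")
--         else:
--             sections.append(f"### {filename}\n\n{content}")
--
--     return "\n\n---\n\n".join(sections)
-- ===== Notes on version B (the rewrite author's own statement) =====
-- stated objective: alternative
-- what changed: A's two emission loops (a scan over the fixed priority list, then a separate loop over the alphabetically sorted remaining files) are replaced by one sort of all filenames under a composite key (priority rank, then name) followed by a single uniform formatting pass.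
import Mathlib
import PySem

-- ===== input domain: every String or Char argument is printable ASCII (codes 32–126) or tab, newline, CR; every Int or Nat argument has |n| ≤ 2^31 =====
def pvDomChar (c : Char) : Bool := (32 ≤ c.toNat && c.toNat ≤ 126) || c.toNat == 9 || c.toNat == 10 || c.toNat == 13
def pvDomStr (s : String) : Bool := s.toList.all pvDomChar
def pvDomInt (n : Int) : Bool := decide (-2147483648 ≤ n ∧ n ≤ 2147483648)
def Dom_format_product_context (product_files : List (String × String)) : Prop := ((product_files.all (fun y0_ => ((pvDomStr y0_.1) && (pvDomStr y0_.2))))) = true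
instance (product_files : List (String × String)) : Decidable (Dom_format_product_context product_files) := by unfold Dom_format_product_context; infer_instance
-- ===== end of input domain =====

-- B replaces A's two separate emission loops (priority scan + sorted-others scan) by one
-- composite-key sort of all filenames followed by a single uniform formatting pass (objective: alternative).


-- ===== PORT A =====
-- the Python argument is a dict; its Lean value is the association list of its items, read
-- through PySem.Dict.ofList (duplicate keys overwrite in place, exactly as dict() would)
def format_product_context (product_files : List (String × String)) : String :=
  let d := PySem.Dict.ofList product_files
  if d.size = 0 then ""
  else
    let priority_files : List String := ["mission.md", "roadmap.md", "tech-stack.md"]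
    -- add priority files first
    let sections := priority_files.foldl (fun acc filename =>
      if d.contains filename then
        -- lookup of a key known to be present: getD "" = product_files[filename]
        acc ++ ["### " ++ filename ++ "\n\n" ++ d.getD filename ""]
      else acc) []
    -- add other product files
    let other_files := d.keys.filter (fun f => !(priority_files.contains f))
    let sections := (PySem.List.sorted other_files (fun x => x)).foldl (fun acc filename =>
      if PySem.Str.endswith filename ".yaml" || PySem.Str.endswith filename ".yml" then
        acc ++ ["### " ++ filename ++ "\n\n```yaml\n" ++ d.getD filename "" ++ "\n```"]
      else
        acc ++ ["### " ++ filename ++ "\n\n" ++ d.getD filename ""]) sections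
    PySem.Str.join "\n\n---\n\n" sections

-- ===== PORT B =====
-- B's sort_key: str(rank) + f, rank = index among the priority files or their count
def pvSortKey (priority_files : List String) (f : String) : String :=
  (match PySem.List.index? priority_files f with
   | some i => PySem.Int.toStr (i : Int)
   | none   => PySem.Int.toStr (priority_files.length : Int)) ++ f

def format_product_context_alt (product_files : List (String × String)) : String :=
  let d := PySem.Dict.ofList product_files
  if d.size = 0 then ""
  else
    let priority_files : List String := ["mission.md", "roadmap.md", "tech-stack.md"]
    let sections := (PySem.List.sorted d.keys (pvSortKey priority_files)).foldl (fun acc filename =>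
      if PySem.Str.endswith filename ".yaml" || PySem.Str.endswith filename ".yml" then
        acc ++ ["### " ++ filename ++ "\n\n```yaml\n" ++ d.getD filename "" ++ "\n```"]
      else
        acc ++ ["### " ++ filename ++ "\n\n" ++ d.getD filename ""]) []
  PySem.Str.join "\n\n---\n\n" sections

-- ===== PRECONDITION & SPEC =====
def Spec_format_product_context (product_files : List (String × String)) (out : String) : Prop := out = format_product_context_alt product_files
instance (product_files : List (String × String)) (out : String) : Decidable (Spec_format_product_context product_files out) := by unfold Spec_format_product_context; infer_instance

-- ===== CLAIM (what is proved, stated in full; the proofs are below) =====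
def Claim_equal_format_product_context : Prop := ∀ (product_files : List (String × String)), Dom_format_product_context product_files → Spec_format_product_context product_files (format_product_context product_files)

-- ===== LEMMAS AND PROOFS =====

-- pvSortKey on a non-priority filename is "3" ++ f
theorem pvSortKey_not_mem (f : String)
    (h : (["mission.md", "roadmap.md", "tech-stack.md"] : List String).contains f = false) :
    pvSortKey ["mission.md", "roadmap.md", "tech-stack.md"] f = "3" ++ f := by
  have hn : PySem.List.index? ["mission.md", "roadmap.md", "tech-stack.md"] f = none := by
    simp [PySem.List.index?]; simpa using h
  rw [pvSortKey, hn]; congr 1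

theorem pvSortKey_mission : pvSortKey ["mission.md", "roadmap.md", "tech-stack.md"] "mission.md" = "0" ++ "mission.md" := by decide
theorem pvSortKey_roadmap : pvSortKey ["mission.md", "roadmap.md", "tech-stack.md"] "roadmap.md" = "1" ++ "roadmap.md" := by decide
theorem pvSortKey_tech : pvSortKey ["mission.md", "roadmap.md", "tech-stack.md"] "tech-stack.md" = "2" ++ "tech-stack.md" := by decide

-- string lex order: strictly smaller first character decides
theorem pv_str_lt_head (x y : String) (c₁ c₂ : Char) (a b : List Char) (h : c₁ < c₂)
    (hx : x.toList = c₁ :: a) (hy : y.toList = c₂ :: b) : x < y := by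
  rw [String.lt_iff_toList_lt, hx, hy]
  exact List.Lex.rel h

-- string lex order: appending on the left of a strict inequality keeps it
theorem pv_str_append_left_lt (s a b : String) (h : a < b) : s ++ a < s ++ b := by
  rw [String.lt_iff_toList_lt, String.toList_append, String.toList_append]
  exact List.append_left_lt (String.lt_iff_toList_lt.mp h)

theorem pv_toList_rank_append (c : Char) (s f : String) (hs : s.toList = [c]) :
    (s ++ f).toList = c :: f.toList := by
  rw [String.toList_append, hs]; rfl

-- B's single composite-key sort = A's priority files present (fixed order) ++ sorted other files
theorem pv_sorted_keys (d : PySem.Dict String String) (hnd : d.keys.Nodup) :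
    PySem.List.sorted d.keys (pvSortKey ["mission.md", "roadmap.md", "tech-stack.md"])
      = (["mission.md", "roadmap.md", "tech-stack.md"] : List String).filter (fun f => d.contains f)
        ++ PySem.List.sorted (d.keys.filter (fun f => !((["mission.md", "roadmap.md", "tech-stack.md"] : List String).contains f))) (fun x => x) := by
  apply PySem.List.sorted_eq_of_perm_of_pairwise_lt
  · -- the right-hand side is a permutation of d.keys
    have h1 : ((["mission.md", "roadmap.md", "tech-stack.md"] : List String).filter (fun f => d.contains f)).Perm
        (d.keys.filter (fun f => (["mission.md", "roadmap.md", "tech-stack.md"] : List String).contains f)) := by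
      apply (List.perm_ext_iff_of_nodup (List.Nodup.filter _ (by decide)) (hnd.filter _)).mpr
      intro x
      simp only [List.mem_filter, PySem.Dict.contains_iff_mem_keys, List.contains_iff_mem]
      constructor
      · rintro ⟨h1, h2⟩; exact ⟨by simpa [PySem.Dict.contains_iff_mem_keys] using h2, by simpa using h1⟩
      · rintro ⟨h1, h2⟩; exact ⟨by simpa using h2, by simp [h1]⟩
    have h2 := PySem.List.sorted_perm (d.keys.filter (fun f => !((["mission.md", "roadmap.md", "tech-stack.md"] : List String).contains f))) (fun x => x) false
    exact (h1.append h2).trans (List.filter_append_perm _ _)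
  · -- the right-hand side is strictly increasing under the composite key
    apply List.pairwise_append.mpr
    refine ⟨?_, ?_, ?_⟩
    · -- priority part: a sublist of the literal priority list, which is key-increasing
      have hP : List.Pairwise
          (fun a b => pvSortKey ["mission.md", "roadmap.md", "tech-stack.md"] a < pvSortKey ["mission.md", "roadmap.md", "tech-stack.md"] b)
          (["mission.md", "roadmap.md", "tech-stack.md"] : List String) := by
        refine List.pairwise_cons.mpr ⟨?_, List.pairwise_cons.mpr ⟨?_, by simp⟩⟩
        · intro b hb
          rw [pvSortKey_mission]
          simp only [List.mem_cons, List.not_mem_nil, or_false] at hb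
          rcases hb with rfl | rfl
          · rw [pvSortKey_roadmap]
            exact pv_str_lt_head _ _ '0' '1' _ _ (by decide)
              (pv_toList_rank_append '0' _ _ (by decide)) (pv_toList_rank_append '1' _ _ (by decide))
          · rw [pvSortKey_tech]
            exact pv_str_lt_head _ _ '0' '2' _ _ (by decide)
              (pv_toList_rank_append '0' _ _ (by decide)) (pv_toList_rank_append '2' _ _ (by decide))
        · intro b hb
          simp only [List.mem_cons, List.not_mem_nil, or_false] at hb
          rcases hb with rfl
          rw [pvSortKey_roadmap, pvSortKey_tech]
          exact pv_str_lt_head _ _ '1' '2' _ _ (by decide)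
            (pv_toList_rank_append '1' _ _ (by decide)) (pv_toList_rank_append '2' _ _ (by decide))
      exact List.Pairwise.sublist (List.filter_sublist) hP
    · -- sorted-others part: names strictly increase (nodup), key = "3" ++ name is monotone
      have hno : (d.keys.filter (fun f => !((["mission.md", "roadmap.md", "tech-stack.md"] : List String).contains f))).Nodup := hnd.filter _
      have hsp := PySem.List.sorted_pairwise (d.keys.filter (fun f => !((["mission.md", "roadmap.md", "tech-stack.md"] : List String).contains f))) (fun x => x)
      have hsn : (PySem.List.sorted (d.keys.filter (fun f => !((["mission.md", "roadmap.md", "tech-stack.md"] : List String).contains f))) (fun x => x)).Nodup :=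
        ((PySem.List.sorted_perm _ _ false).symm.nodup hno)
      have hcomb := hsp.and hsn
      apply hcomb.imp_of_mem
      intro a b ha hb hab
      have hna : (["mission.md", "roadmap.md", "tech-stack.md"] : List String).contains a = false := by
        have := (List.mem_filter.mp ((PySem.List.sorted_perm _ _ false).mem_iff.mp ha)).2
        simpa using this
      have hnb : (["mission.md", "roadmap.md", "tech-stack.md"] : List String).contains b = false := by
        have := (List.mem_filter.mp ((PySem.List.sorted_perm _ _ false).mem_iff.mp hb)).2
        simpa using this
      rw [pvSortKey_not_mem a hna, pvSortKey_not_mem b hnb]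
      exact pv_str_append_left_lt _ _ _ (lt_of_le_of_ne hab.1 hab.2)
    · -- every priority key is below every rank-3 key
      intro p hp q hq
      have hnq : (["mission.md", "roadmap.md", "tech-stack.md"] : List String).contains q = false := by
        have := (List.mem_filter.mp ((PySem.List.sorted_perm _ _ false).mem_iff.mp hq)).2
        simpa using this
      rw [pvSortKey_not_mem q hnq]
      have hq3 : ("3" ++ q).toList = '3' :: q.toList := pv_toList_rank_append '3' _ _ (by decide)
      have hp' := (List.mem_filter.mp hp).1
      simp only [List.mem_cons, List.not_mem_nil, or_false] at hp'
      rcases hp' with rfl | rfl | rfl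
      · rw [pvSortKey_mission]
        exact pv_str_lt_head _ _ '0' '3' _ _ (by decide) (pv_toList_rank_append '0' _ _ (by decide)) hq3
      · rw [pvSortKey_roadmap]
        exact pv_str_lt_head _ _ '1' '3' _ _ (by decide) (pv_toList_rank_append '1' _ _ (by decide)) hq3
      · rw [pvSortKey_tech]
        exact pv_str_lt_head _ _ '2' '3' _ _ (by decide) (pv_toList_rank_append '2' _ _ (by decide)) hq3

-- the two-branch section loop is a map
theorem pv_foldl_sections (l : List String) (acc : List String)
    (p : String → Bool) (f g : String → String) :
    l.foldl (fun acc x => if p x then acc ++ [f x] else acc ++ [g x]) acc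
      = acc ++ l.map (fun x => if p x then f x else g x) := by
  have he : (fun (acc : List String) x => if p x then acc ++ [f x] else acc ++ [g x])
      = (fun acc x => acc ++ [if p x then f x else g x]) := by
    funext acc x; split <;> rfl
  rw [he, PySem.List.foldl_append_singleton_eq_map]

-- A's and B's section lists coincide
theorem pv_core (d : PySem.Dict String String) (hnd : d.keys.Nodup) :
    (PySem.List.sorted (d.keys.filter (fun f => !((["mission.md", "roadmap.md", "tech-stack.md"] : List String).contains f))) (fun x => x)).foldl
      (fun acc filename =>
        if PySem.Str.endswith filename ".yaml" || PySem.Str.endswith filename ".yml" then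
          acc ++ ["### " ++ filename ++ "\n\n```yaml\n" ++ d.getD filename "" ++ "\n```"]
        else acc ++ ["### " ++ filename ++ "\n\n" ++ d.getD filename ""])
      ((["mission.md", "roadmap.md", "tech-stack.md"] : List String).foldl
        (fun acc filename =>
          if d.contains filename then acc ++ ["### " ++ filename ++ "\n\n" ++ d.getD filename ""] else acc) [])
    = (PySem.List.sorted d.keys (pvSortKey ["mission.md", "roadmap.md", "tech-stack.md"])).foldl
      (fun acc filename =>
        if PySem.Str.endswith filename ".yaml" || PySem.Str.endswith filename ".yml" then
          acc ++ ["### " ++ filename ++ "\n\n```yaml\n" ++ d.getD filename "" ++ "\n```"]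
        else acc ++ ["### " ++ filename ++ "\n\n" ++ d.getD filename ""]) [] := by
  rw [PySem.List.foldl_append_if, pv_foldl_sections, pv_foldl_sections, pv_sorted_keys d hnd,
    List.map_append]
  simp only [List.nil_append]
  congr 1
  apply List.map_congr_left
  intro x hx
  have : (PySem.Str.endswith x ".yaml" || PySem.Str.endswith x ".yml") = false := by
    have hx' := (List.mem_filter.mp hx).1
    simp only [List.mem_cons, List.not_mem_nil, or_false] at hx'
    rcases hx' with rfl | rfl | rfl <;> decide
  rw [this]
  rfl

-- ===== VERDICT (by name: the statement is the Claim_ definition above) =====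
theorem format_product_context_spec : Claim_equal_format_product_context := by
  intro product_files _
  unfold Spec_format_product_context format_product_context format_product_context_alt
  dsimp only []
  by_cases h0 : (PySem.Dict.ofList product_files).size = 0
  · rw [if_pos h0, if_pos h0]
  · rw [if_neg h0, if_neg h0]
    congr 1
    exact pv_core (PySem.Dict.ofList product_files) (PySem.Dict.nodup_keys_ofList product_files)
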